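-- pv_equiv track=rewrite | github.com/elmamoun/monitoring-dashboard | unedic-tre-reporting-des-previsions-mensuelles-cde871dcb738/code/utils.py | label_niv
-- ===== SOURCE A (Python) =====
-- def label_niv (row,niv1,niv2,niv3):
--     for x in niv1:
--         if row[0] == x :
--             return 'niv01'
--     for x in niv2:
--         if row[0] == x :
--             return 'niv02'
--     for x in niv3 :
--         if row[0] == x :
--             return 'niv03'
--     if row[0] == None :
--         return ''
-- ===== SOURCE B (Python) =====
-- def label_niv(row, niv1, niv2, niv3):
--     labels = {}
--     for x in niv3:
--         labels[x] = 'niv03'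
--     for x in niv2:
--         labels[x] = 'niv02'
--     for x in niv1:
--         labels[x] = 'niv01'
--     return labels.get(row[0])
-- ===== Notes on version B (the rewrite author's own statement) =====
-- stated objective: idiomatic
-- what changed: B builds one value-to-label dict (niv3 then niv2 then niv1 so earlier lists win on collisions) and does a single lookup, instead of three sequential membership scans; the dead 'row[0] == None' branch (row holds strings) is dropped since get() already yields None.
import Mathlib
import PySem

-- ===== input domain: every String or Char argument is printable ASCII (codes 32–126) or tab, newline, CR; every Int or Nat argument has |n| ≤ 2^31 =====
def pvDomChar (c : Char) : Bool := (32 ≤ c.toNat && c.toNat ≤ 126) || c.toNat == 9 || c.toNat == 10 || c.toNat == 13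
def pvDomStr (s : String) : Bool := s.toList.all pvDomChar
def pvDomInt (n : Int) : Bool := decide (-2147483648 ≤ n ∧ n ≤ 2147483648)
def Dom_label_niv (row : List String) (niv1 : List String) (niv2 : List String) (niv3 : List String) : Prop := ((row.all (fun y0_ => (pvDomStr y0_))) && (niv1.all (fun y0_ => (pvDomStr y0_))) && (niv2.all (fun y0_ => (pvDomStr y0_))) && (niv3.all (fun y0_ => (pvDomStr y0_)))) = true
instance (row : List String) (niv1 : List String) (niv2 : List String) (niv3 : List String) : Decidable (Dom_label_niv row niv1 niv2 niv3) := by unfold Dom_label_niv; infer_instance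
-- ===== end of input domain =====

-- B replaces A's three sequential membership scans by one dict built in reverse priority order plus a single lookup (idiomatic; same cost).
-- A's final 'row[0] == None' branch is dead on the string domain, so neither port has it.

-- ===== PORT A =====
-- A's 'for x in xs: if row[0] == x: return lab' loop, as structural recursion
def labelScan (r0 : String) : List String → Bool
  | [] => false
  | x :: rest => if r0 = x then true else labelScan r0 rest

def label_niv (row : List String) (niv1 : List String) (niv2 : List String) (niv3 : List String) : Option String :=
  match PySem.List.pyGet? row 0 with   -- row[0]; Python raises IndexError on empty row (excluded by Pre_)
  | none => none
  | some r0 =>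
    if labelScan r0 niv1 then some "niv01"
    else if labelScan r0 niv2 then some "niv02"
    else if labelScan r0 niv3 then some "niv03"
    else none   -- 'row[0] == None' is always false for a string, then Python falls off the end returning None

-- ===== PORT B =====
def label_niv_alt (row : List String) (niv1 : List String) (niv2 : List String) (niv3 : List String) : Option String :=
  let d := niv1.foldl (fun d x => d.insert x "niv01")
            (niv2.foldl (fun d x => d.insert x "niv02")
              (niv3.foldl (fun d x => d.insert x "niv03") (PySem.Dict.empty)))
  match PySem.List.pyGet? row 0 with   -- row[0]; raises on empty row (excluded by Pre_)
  | none => none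
  | some v => d.get? v   -- labels.get(row[0])

-- ===== PRECONDITION & SPEC =====
-- A (and B) raise IndexError on row[0] when row is empty; nothing else raises.
def Pre_label_niv (row : List String) (niv1 : List String) (niv2 : List String) (niv3 : List String) : Prop := row ≠ []
instance (row : List String) (niv1 : List String) (niv2 : List String) (niv3 : List String) : Decidable (Pre_label_niv row niv1 niv2 niv3) := by unfold Pre_label_niv; infer_instance
def pvWitness_label_niv : List String × List String × List String × List String := (["a"], ["b"], ["a"], [])

def Spec_label_niv (row : List String) (niv1 : List String) (niv2 : List String) (niv3 : List String) (out : Option String) : Prop := out = label_niv_alt row niv1 niv2 niv3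
instance (row : List String) (niv1 : List String) (niv2 : List String) (niv3 : List String) (out : Option String) : Decidable (Spec_label_niv row niv1 niv2 niv3 out) := by unfold Spec_label_niv; infer_instance

-- ===== CLAIM (what is proved, stated in full; the proofs are below) =====
def Claim_equal_label_niv : Prop := ∀ (row : List String) (niv1 : List String) (niv2 : List String) (niv3 : List String), Dom_label_niv row niv1 niv2 niv3 → Pre_label_niv row niv1 niv2 niv3 → Spec_label_niv row niv1 niv2 niv3 (label_niv row niv1 niv2 niv3)

-- ===== LEMMAS AND PROOFS =====

theorem labelScan_eq_mem (r0 : String) (xs : List String) : labelScan r0 xs = decide (r0 ∈ xs) := by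
  induction xs with
  | nil => simp [labelScan]
  | cons x rest ih => by_cases h : r0 = x <;> simp [labelScan, h, ih]

theorem get?_foldl_const (xs : List String) (lab : String) (d : PySem.Dict String String) (v : String) :
    (xs.foldl (fun d x => d.insert x lab) d).get? v = if v ∈ xs then some lab else d.get? v := by
  induction xs generalizing d with
  | nil => simp
  | cons x rest ih =>
    simp only [List.foldl_cons, ih, PySem.Dict.get?_insert, List.mem_cons]
    by_cases hx : v = x <;> by_cases hr : v ∈ rest <;> simp [hx, hr]

-- ===== VERDICT (by name: the statement is the Claim_ definition above) =====
theorem label_niv_spec : Claim_equal_label_niv := by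
  intro row niv1 niv2 niv3 _ _
  unfold Spec_label_niv label_niv label_niv_alt
  cases h : PySem.List.pyGet? row 0 with
  | none => simp
  | some r0 =>
    simp only [labelScan_eq_mem, get?_foldl_const, PySem.Dict.get?_empty]
    by_cases h1 : r0 ∈ niv1 <;> by_cases h2 : r0 ∈ niv2 <;> by_cases h3 : r0 ∈ niv3 <;>
      simp [h1, h2, h3]
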